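-- pv_equiv track=rewrite | github.com/chenant2017/cp-problems | Silver/2016 Jan/angry.py | check
-- ===== SOURCE A (Python) =====
-- def check(K, R, hays):
--   pos = hays[0]
--   pointer = 0
--   cows_left = K
--
--   while pos <= hays[-1]:
--     pos += 2 * R + 1
--     cows_left -= 1
--     found = False
--     for h in range(pointer, len(hays)):
--       if hays[h] >= pos:
--         pointer = h
--         found = True
--         break
--     if not found:
--       break
--     pos = hays[pointer]
--
--   if cows_left < 0:
--     return False
--   return True
-- ===== SOURCE B (Python) =====
-- def check(K, R, hays):
--   last = hays[-1]
--   width = 2 * R + 1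
--   rest = hays
--   cows = 0
--   while rest and rest[0] <= last:
--     cows += 1
--     limit = rest[0] + width
--     rest = [x for x in rest if x >= limit]
--   return cows <= K
-- ===== Notes on version B (the rewrite author's own statement) =====
-- stated objective: alternative
-- what changed: Replaced the while-loop with pos/pointer/found/cows_left state and a resumable inner index scan by staged passes: each time a cow is placed, the remaining haystack list is rebuilt with a comprehension keeping only the uncovered elements, and the final cow count is compared to K; this trades the amortized O(n) pointer scan for a plainer multi-pass formulation.
import Mathlib
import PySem

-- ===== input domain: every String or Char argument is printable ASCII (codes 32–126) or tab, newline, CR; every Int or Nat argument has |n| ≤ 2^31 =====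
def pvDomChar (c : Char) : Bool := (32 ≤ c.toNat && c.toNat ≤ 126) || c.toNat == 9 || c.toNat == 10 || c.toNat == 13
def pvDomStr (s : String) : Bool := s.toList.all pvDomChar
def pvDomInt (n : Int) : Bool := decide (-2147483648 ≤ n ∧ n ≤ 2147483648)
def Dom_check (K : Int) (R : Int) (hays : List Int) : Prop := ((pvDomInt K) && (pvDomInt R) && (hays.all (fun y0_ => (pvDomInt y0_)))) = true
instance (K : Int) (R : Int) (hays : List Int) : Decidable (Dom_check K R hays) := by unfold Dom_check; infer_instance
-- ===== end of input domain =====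

-- B replaces A's pointer-resumed while-loop (pos / pointer / found / cows_left) by rounds that
-- rebuild the remaining list with a filter each time a cow is placed, then compares the count to K.

-- ===== PORT A =====
-- inner 'for h in range(pointer, len(hays)): if hays[h] >= pos: … break': first index ≥ h with value ≥ pos
def findGe (hays : List Int) (pos : Int) (h : Nat) : Option Nat :=
  if _hh : h < hays.length then
    if hays.getD h 0 ≥ pos then some h else findGe hays pos (h + 1)
  else none
termination_by hays.length - h

-- the while-loop; fuel = hays.length + 1 suffices on every input Pre_check admits
-- (each iteration either exits or strictly advances pointer)
def checkLoop (R last : Int) (hays : List Int) (fuel : Nat) (pos : Int) (pointer : Nat) (cows_left : Int) : Int :=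
  if _hf : fuel = 0 then cows_left
  else if pos ≤ last then
    -- pos += 2*R+1; cows_left -= 1; scan; break if not found, else pos = hays[pointer]
    match findGe hays (pos + 2 * R + 1) pointer with
    | none => cows_left - 1
    | some h => checkLoop R last hays (fuel - 1) (hays.getD h 0) h (cows_left - 1)
  else cows_left
termination_by fuel
decreasing_by omega

def check (K : Int) (R : Int) (hays : List Int) : Bool :=
  if hays = [] then false  -- Python raises IndexError at hays[0]; excluded by Pre_check
  else decide (0 ≤ checkLoop R hays.getLastI hays (hays.length + 1) hays.headI 0 K)

-- ===== PORT B =====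
-- Source B's while-loop: count the head, rebuild rest by the comprehension filter; fuel = length + 1
-- suffices on every input Pre_check admits (width ≥ 1 there, so each round drops the head)
def bLoop (last width : Int) : Nat → List Int → Int → Int
  | 0, _, cows => cows
  | _ + 1, [], cows => cows
  | fuel + 1, x :: xs, cows =>
    if x ≤ last then
      bLoop last width fuel ((x :: xs).filter (fun y => decide (x + width ≤ y))) (cows + 1)
    else cows

def check_alt (K : Int) (R : Int) (hays : List Int) : Bool :=
  if hays = [] then false  -- Python raises IndexError at hays[-1]; excluded by Pre_check
  else decide (bLoop hays.getLastI (2 * R + 1) (hays.length + 1) hays 0 ≤ K)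

-- ===== PRECONDITION & SPEC =====
-- Pre_ excludes the empty list (A raises IndexError) and the inputs with R < 0 on which A's
-- while-loop never terminates (entered with 2*R+1 ≤ 0 it re-finds the same pointer forever);
-- with R < 0 A returns exactly when hays[0] > hays[-1] (the loop is never entered).
def Pre_check (K : Int) (R : Int) (hays : List Int) : Prop :=
  hays ≠ [] ∧ (0 ≤ R ∨ hays.headI > hays.getLastI)
instance (K : Int) (R : Int) (hays : List Int) : Decidable (Pre_check K R hays) := by
  unfold Pre_check; infer_instance

def pvWitness_check : Int × Int × List Int := (2, 1, [1, 4, 9])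

def Spec_check (K : Int) (R : Int) (hays : List Int) (out : Bool) : Prop := out = check_alt K R hays
instance (K : Int) (R : Int) (hays : List Int) (out : Bool) : Decidable (Spec_check K R hays out) := by unfold Spec_check; infer_instance

-- ===== CLAIM (what is proved, stated in full; the proofs are below) =====
def Claim_equal_check : Prop := ∀ (K : Int) (R : Int) (hays : List Int), Dom_check K R hays → Pre_check K R hays → Spec_check K R hays (check K R hays)

-- ===== LEMMAS AND PROOFS =====

-- proof-side reference loop: one flat pass keeping a coverage limit and a cow count;
-- both ports are shown to compute its count
def altLoop (last width : Int) : List Int → Int → Int → Int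
  | [], _, cows => cows
  | x :: xs, limit, cows =>
    if x ≥ limit then
      if x > last then cows
      else altLoop last width xs (x + width) (cows + 1)
    else altLoop last width xs limit cows

theorem altLoop_add (last width : Int) (xs : List Int) (L c : Int) :
    altLoop last width xs L c = c + altLoop last width xs L 0 := by
  induction xs generalizing L c with
  | nil => simp [altLoop]
  | cons x xs ih =>
    simp only [altLoop]
    split_ifs with h1 h2
    · simp
    · rw [ih (x + width) (c + 1), ih (x + width) (0 + 1)]
      ring
    · exact ih L c

-- skipping elements below the limit does nothing
theorem altLoop_skip (last width L c : Int) (hays : List Int) (q j : Nat)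
    (hqj : q ≤ j) (hj : j ≤ hays.length)
    (hlt : ∀ i, q ≤ i → i < j → hays.getD i 0 < L) :
    altLoop last width (hays.drop q) L c = altLoop last width (hays.drop j) L c := by
  rcases Nat.eq_or_lt_of_le hqj with h1 | h1
  · rw [h1]
  · have hq : q < hays.length := by omega
    rw [List.drop_eq_getElem_cons hq]
    have hx : hays[q] < L := by
      have := hlt q le_rfl h1
      rwa [List.getD_eq_getElem _ _ hq] at this
    simp only [altLoop, if_neg (by omega : ¬ hays[q] ≥ L)]
    exact altLoop_skip last width L c hays (q + 1) j (by omega) hj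
      (fun i a b => hlt i (by omega) b)
termination_by j - q

theorem findGe_none (hays : List Int) (pos : Int) (h i : Nat)
    (hfind : findGe hays pos h = none) (hhi : h ≤ i) (hi : i < hays.length) :
    hays.getD i 0 < pos := by
  rw [findGe] at hfind
  split_ifs at hfind with hh hge
  · rcases Nat.eq_or_lt_of_le hhi with h1 | h1
    · rw [← h1]; omega
    · exact findGe_none hays pos (h + 1) i hfind h1 hi
  · omega
termination_by hays.length - h
decreasing_by omega

theorem findGe_some (hays : List Int) (pos : Int) (h j : Nat)
    (hfind : findGe hays pos h = some j) :
    h ≤ j ∧ j < hays.length ∧ hays.getD j 0 ≥ pos ∧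
      ∀ i, h ≤ i → i < j → hays.getD i 0 < pos := by
  rw [findGe] at hfind
  split_ifs at hfind with hh hge
  · obtain rfl : h = j := by injection hfind
    exact ⟨le_rfl, hh, hge, fun i h1 h2 => absurd h2 (by omega)⟩
  · obtain ⟨a, b, c, d⟩ := findGe_some hays pos (h + 1) j hfind
    refine ⟨by omega, b, c, fun i h1 h2 => ?_⟩
    rcases Nat.eq_or_lt_of_le h1 with h3 | h3
    · rw [← h3]; omega
    · exact d i h3 h2
termination_by hays.length - h
decreasing_by omega

-- if the head passes both limits, the limit value itself is irrelevant
theorem altLoop_head_ge (last width L1 L2 c : Int) (x : Int) (xs : List Int)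
    (h1 : x ≥ L1) (h2 : x ≥ L2) :
    altLoop last width (x :: xs) L1 c = altLoop last width (x :: xs) L2 c := by
  simp only [altLoop, if_pos h1, if_pos h2]

-- A-side invariant: A's loop from state (pos = hays[p], pointer = p, cows_left = c)
-- computes c minus the flat-pass cow count over the suffix from p, provided 2*R+1 ≥ 1
theorem main_inv (R last : Int) (hays : List Int) (hR : 1 ≤ 2 * R + 1) :
    ∀ fuel p (c : Int), p < hays.length → hays.length - p < fuel →
    checkLoop R last hays fuel (hays.getD p 0) p c
      = c - altLoop last (2 * R + 1) (hays.drop p) (hays.getD p 0) 0 := by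
  intro fuel
  induction fuel with
  | zero => intro p c hp hf; omega
  | succ fuel ih =>
    intro p c hp hf
    have hdrop : hays.drop p = hays[p] :: hays.drop (p + 1) :=
      List.drop_eq_getElem_cons hp
    have hgd : hays.getD p 0 = hays[p] := List.getD_eq_getElem _ _ hp
    rw [checkLoop]
    simp only [dif_neg (by omega : ¬ (fuel + 1 = 0)), Nat.add_sub_cancel]
    by_cases hle : hays.getD p 0 ≤ last
    · -- A enters the loop body; the flat pass counts a cow at p
      rw [if_pos hle]
      have hBp : altLoop last (2 * R + 1) (hays.drop p) (hays.getD p 0) 0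
          = 1 + altLoop last (2 * R + 1) (hays.drop (p + 1)) (hays.getD p 0 + (2 * R + 1)) 0 := by
        rw [hdrop]
        simp only [altLoop, hgd, if_pos (le_refl hays[p]),
          if_neg (by omega : ¬ hays[p] > last)]
        rw [altLoop_add]
        ring
      cases hfind : findGe hays (hays.getD p 0 + 2 * R + 1) p with
      | none =>
        -- no further stack reaches the new limit: the flat pass skips everything
        have hskip : altLoop last (2 * R + 1) (hays.drop (p + 1)) (hays.getD p 0 + (2 * R + 1)) 0
            = altLoop last (2 * R + 1) (hays.drop hays.length) (hays.getD p 0 + (2 * R + 1)) 0 := by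
          apply altLoop_skip _ _ _ _ hays (p + 1) hays.length (by omega) le_rfl
          intro i h1 h2
          have := findGe_none hays (hays.getD p 0 + 2 * R + 1) p i hfind (by omega) h2
          omega
        rw [hBp, hskip]
        simp [altLoop]
      | some j =>
        obtain ⟨hpj, hjlen, hjge, hjlt⟩ := findGe_some hays (hays.getD p 0 + 2 * R + 1) p j hfind
        have hpne : p ≠ j := by
          intro hEq; rw [← hEq] at hjge; omega
        have hskip : altLoop last (2 * R + 1) (hays.drop (p + 1)) (hays.getD p 0 + (2 * R + 1)) 0
            = altLoop last (2 * R + 1) (hays.drop j) (hays.getD p 0 + (2 * R + 1)) 0 := by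
          apply altLoop_skip _ _ _ _ hays (p + 1) j (by omega) (by omega)
          intro i h1 h2
          have := hjlt i (by omega) h2
          omega
        have hdropj : hays.drop j = hays[j] :: hays.drop (j + 1) :=
          List.drop_eq_getElem_cons hjlen
        have hgdj : hays.getD j 0 = hays[j] := List.getD_eq_getElem _ _ hjlen
        have hhead : altLoop last (2 * R + 1) (hays.drop j) (hays.getD p 0 + (2 * R + 1)) 0
            = altLoop last (2 * R + 1) (hays.drop j) (hays.getD j 0) 0 := by
          rw [hdropj]
          exact altLoop_head_ge _ _ _ _ _ _ _ (by rw [hgdj] at hjge; omega) (by rw [hgdj])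
        change checkLoop R last hays fuel (hays.getD j 0) j (c - 1) = _
        rw [ih j (c - 1) hjlen (by omega), hBp, hskip, hhead]
        ring
    · -- pos > last: A exits; the flat pass sees its start element past last and stops
      rw [if_neg hle]
      rw [hdrop]
      simp only [altLoop, hgd, if_pos (le_refl hays[p]),
        if_pos (by omega : hays[p] > last)]
      ring

-- B-side: removing the elements below a bound ≤ the running limit does not change the flat pass
theorem altLoop_filter (last width : Int) (hw : 0 ≤ width) (xs : List Int) :
    ∀ (L L' c : Int), L ≤ L' →
    altLoop last width (xs.filter (fun y => decide (L ≤ y))) L' c = altLoop last width xs L' c := by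
  induction xs with
  | nil => intro L L' c _; rfl
  | cons y ys ih =>
    intro L L' c hLL
    by_cases hy : L ≤ y
    · rw [List.filter_cons_of_pos (by simpa using hy)]
      by_cases h1 : y ≥ L'
      · by_cases h2 : y > last
        · simp only [altLoop, if_pos h1, if_pos h2]
        · simp only [altLoop, if_pos h1, if_neg h2]
          exact ih L (y + width) (c + 1) (by omega)
      · simp only [altLoop, if_neg h1]
        exact ih L L' c hLL
    · rw [List.filter_cons_of_neg (by simpa using hy)]
      have : ¬ y ≥ L' := by omega
      conv_rhs => rw [altLoop]
      rw [if_neg this]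
      exact ih L L' c hLL

-- B-side invariant: Source B's round loop computes the flat-pass count, provided width ≥ 1
theorem bLoop_eq_altLoop (last width : Int) (hw : 1 ≤ width) :
    ∀ (fuel : Nat) (rest : List Int) (L c : Int), rest.length < fuel →
    (∀ x xs, rest = x :: xs → L ≤ x) →
    bLoop last width fuel rest c = altLoop last width rest L c := by
  intro fuel
  induction fuel with
  | zero => intro rest L c h _; omega
  | succ fuel ih =>
    intro rest L c hlen hhd
    cases rest with
    | nil => rfl
    | cons x xs =>
      have hLx : L ≤ x := hhd x xs rfl
      by_cases hxl : x ≤ last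
      · simp only [bLoop, if_pos hxl]
        have hfil : (x :: xs).filter (fun y => decide (x + width ≤ y))
            = xs.filter (fun y => decide (x + width ≤ y)) := by
          rw [List.filter_cons_of_neg (by simp; omega)]
        have hrhs : altLoop last width (x :: xs) L c
            = altLoop last width xs (x + width) (c + 1) := by
          simp only [altLoop, if_pos (by omega : x ≥ L), if_neg (by omega : ¬ x > last)]
        rw [hrhs, hfil]
        rw [ih (xs.filter (fun y => decide (x + width ≤ y))) (x + width) (c + 1)
          (by have := List.length_filter_le (fun y => decide (x + width ≤ y)) xs; simp at hlen ⊢; omega)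
          (fun z zs hz => by
            have hmem : z ∈ xs.filter (fun y => decide (x + width ≤ y)) := by
              rw [hz]; exact List.mem_cons_self
            have := List.of_mem_filter hmem
            simpa using this)]
        exact altLoop_filter last width (by omega) xs (x + width) (x + width) (c + 1) le_rfl
      · simp only [bLoop, if_neg hxl]
        simp only [altLoop, if_pos (by omega : x ≥ L), if_pos (by omega : x > last)]

-- ===== VERDICT (by name: the statement is the Claim_ definition above) =====
theorem check_spec : Claim_equal_check := by
  intro K R hays _hdom hpre
  obtain ⟨hne, hcase⟩ := hpre
  unfold Spec_check check check_alt
  rw [if_neg hne, if_neg hne]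
  have hlen : 0 < hays.length := List.length_pos_iff.mpr hne
  have hget0 : hays.getD 0 0 = hays.headI := by
    cases hays with
    | nil => exact absurd rfl hne
    | cons a as => rfl
  rcases hcase with hR | hgt
  · have hmi := main_inv R hays.getLastI hays (by omega) (hays.length + 1) 0 K hlen (by omega)
    rw [hget0, List.drop_zero] at hmi
    have hb := bLoop_eq_altLoop hays.getLastI (2 * R + 1) (by omega) (hays.length + 1) hays
      hays.headI 0 (by omega)
      (fun x xs hx => by rw [hx]; rfl)
    rw [hmi, hb]
    simp only [decide_eq_decide]
    omega
  · obtain ⟨a, as, rfl⟩ : ∃ a as, hays = a :: as := by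
      cases hays with
      | nil => exact absurd rfl hne
      | cons a as => exact ⟨a, as, rfl⟩
    have ha : (a :: as).headI = a := rfl
    rw [ha] at hgt ⊢
    rw [checkLoop]
    simp only [dif_neg (by omega : ¬ ((a :: as).length + 1 = 0)),
      if_neg (by omega : ¬ a ≤ (a :: as).getLastI)]
    have : (a :: as).length + 1 = (as.length + 1) + 1 := by simp
    rw [this]
    simp only [bLoop, if_neg (by omega : ¬ a ≤ (a :: as).getLastI)]
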